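-- pv_equiv track=rewrite | github.com/simonholliday/subsequence | subsequence/sequence_utils.py | generate_bresenham_sequence
-- ===== SOURCE A (Python) =====
-- import typing
--
-- def generate_bresenham_sequence (steps: int, pulses: int) -> typing.List[int]:
--
-- 	"""
-- 	Generate a rhythm using Bresenham's line algorithm.
-- 	"""
--
-- 	sequence = [0] * steps
-- 	error = 0
--
-- 	for i in range(steps):
-- 		error += pulses
-- 		if error >= steps:
-- 			sequence[i] = 1
-- 			error -= steps
--
-- 	return sequence
-- ===== SOURCE B (Python) =====
-- import typing
--
-- def generate_bresenham_sequence(steps: int, pulses: int) -> typing.List[int]: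
-- 	"""
-- 	Generate a rhythm using Bresenham's line algorithm, stateless:
-- 	position i carries a pulse iff the running line y = x*pulses/steps
-- 	crosses an integer between x=i and x=i+1.
-- 	"""
-- 	return [1 if ((i + 1) * pulses) // steps - (i * pulses) // steps >= 1 else 0
-- 	        for i in range(steps)]
-- ===== Notes on version B (the rewrite author's own statement) =====
-- stated objective: alternative
-- what changed: Replaces the mutable error-accumulator loop that writes into a preallocated list with a stateless comprehension computing each position independently as a floor-division difference ((i+1)*pulses//steps - i*pulses//steps >= 1).
import Mathlib
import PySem

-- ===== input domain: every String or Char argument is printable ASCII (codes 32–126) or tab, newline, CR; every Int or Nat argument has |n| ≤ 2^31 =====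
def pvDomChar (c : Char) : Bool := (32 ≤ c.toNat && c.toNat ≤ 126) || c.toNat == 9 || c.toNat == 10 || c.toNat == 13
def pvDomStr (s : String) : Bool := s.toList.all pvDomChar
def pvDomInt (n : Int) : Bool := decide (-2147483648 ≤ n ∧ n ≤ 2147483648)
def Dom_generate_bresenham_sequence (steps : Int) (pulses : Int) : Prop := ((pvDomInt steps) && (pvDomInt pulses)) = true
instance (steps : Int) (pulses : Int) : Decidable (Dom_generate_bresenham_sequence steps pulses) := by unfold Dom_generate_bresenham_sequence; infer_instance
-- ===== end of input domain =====

-- B replaces A's mutable error accumulator with a stateless per-index floor-division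
-- difference (alternative decomposition, same O(n) cost); equal on all inputs.

-- ===== PORT A =====
-- A: sequence = [0]*steps; error = 0; for i in range(steps): error += pulses;
--    if error >= steps: sequence[i] = 1; error -= steps.
-- i ranges over range(steps) so 0 ≤ i < steps = len(sequence): 'i.toNat' is exact
-- (no negative index occurs) and List.set is Python's in-range assignment.
def generate_bresenham_sequence (steps : Int) (pulses : Int) : List Int :=
  let sequence : List Int := List.replicate steps.toNat 0
  let r := (PySem.List.pyRange 0 steps 1).foldl
    (fun (st : List Int × Int) i =>
      let error := st.2 + pulses
      if steps ≤ error then (st.1.set i.toNat 1, error - steps) else (st.1, error))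
    (sequence, 0)
  r.1

-- ===== PORT B =====
def generate_bresenham_sequence_alt (steps : Int) (pulses : Int) : List Int :=
  (PySem.List.pyRange 0 steps 1).map (fun i =>
    if 1 ≤ PySem.Int.floordiv ((i + 1) * pulses) steps
          - PySem.Int.floordiv (i * pulses) steps then (1 : Int) else 0)

-- ===== PRECONDITION & SPEC =====
def Spec_generate_bresenham_sequence (steps : Int) (pulses : Int) (out : List Int) : Prop := out = generate_bresenham_sequence_alt steps pulses
instance (steps : Int) (pulses : Int) (out : List Int) : Decidable (Spec_generate_bresenham_sequence steps pulses out) := by unfold Spec_generate_bresenham_sequence; infer_instance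

-- ===== CLAIM (what is proved, stated in full; the proofs are below) =====
def Claim_equal_generate_bresenham_sequence : Prop := ∀ (steps : Int) (pulses : Int), Dom_generate_bresenham_sequence steps pulses → Spec_generate_bresenham_sequence steps pulses (generate_bresenham_sequence steps pulses)

-- ===== LEMMAS AND PROOFS =====

-- A's error value after k iterations (closed recursion mirroring the loop).
def errAt (s p : Int) : Nat → Int
  | 0 => 0
  | k + 1 => if s ≤ errAt s p k + p then errAt s p k + p - s else errAt s p k + p

-- A's bit at position k.
def aBit (s p : Int) (k : Nat) : Int := if s ≤ errAt s p k + p then 1 else 0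

-- B's bit at position i.
def bBit (s p i : Int) : Int :=
  if 1 ≤ PySem.Int.floordiv ((i + 1) * p) s - PySem.Int.floordiv (i * p) s then 1 else 0

-- Closed form of errAt, by the sign regime of p.
theorem errAt_of_ge (s p : Int) (_hs : 0 < s) (hp : s ≤ p) (k : Nat) :
    errAt s p k = k * (p - s) := by
  induction k with
  | zero => simp [errAt]
  | succ k ih =>
      have hk : (0:Int) ≤ (k:Int) * (p - s) :=
        mul_nonneg (by positivity) (by omega)
      simp only [errAt, ih]
      rw [if_pos (by omega)]
      push_cast; ring

theorem errAt_of_mid (s p : Int) (hs : 0 < s) (h0 : 0 ≤ p) (h1 : p < s) (k : Nat) :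
    errAt s p k = ((k : Int) * p) % s := by
  induction k with
  | zero => simp [errAt]
  | succ k ih =>
      have hlt : ((k:Int) * p) % s < s := Int.emod_lt_of_pos _ hs
      have hge : (0:Int) ≤ ((k:Int) * p) % s := Int.emod_nonneg _ (by omega)
      have hdiv := Int.emod_add_ediv ((k:Int) * p) s
      have hrw : ((k:Int) + 1) * p = (((k:Int) * p) % s + p) + s * (((k:Int) * p) / s) := by
        nlinarith [hdiv]
      have hmod : (((k:Int) + 1) * p) % s = (((k:Int) * p) % s + p) % s := by
        rw [hrw, Int.add_mul_emod_self_left]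
      simp only [errAt, ih]
      by_cases hc : s ≤ ((k:Int) * p) % s + p
      · rw [if_pos hc]
        have : (((k:Int) * p) % s + p) % s = ((k:Int) * p) % s + p - s := by
          have h2 : ((k:Int) * p) % s + p - s < s := by omega
          have h3 : (0:Int) ≤ ((k:Int) * p) % s + p - s := by omega
          calc (((k:Int) * p) % s + p) % s
              = ((((k:Int) * p) % s + p - s) + s * 1) % s := by ring_nf
            _ = (((k:Int) * p) % s + p - s) % s := by rw [Int.add_mul_emod_self_left]
            _ = ((k:Int) * p) % s + p - s := Int.emod_eq_of_lt h3 h2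
        push_cast
        omega
      · rw [if_neg hc]
        have : (((k:Int) * p) % s + p) % s = ((k:Int) * p) % s + p :=
          Int.emod_eq_of_lt (by omega) (by omega)
        push_cast
        omega

theorem errAt_of_neg (s p : Int) (_hs : 0 < s) (hp : p < 0) (k : Nat) :
    errAt s p k = k * p := by
  induction k with
  | zero => simp [errAt]
  | succ k ih =>
      have hk : (k:Int) * p ≤ 0 := mul_nonpos_of_nonneg_of_nonpos (by positivity) (by omega)
      simp only [errAt, ih]
      rw [if_neg (by omega)]
      push_cast; ring

-- The two bit definitions agree (for positive steps).
theorem aBit_eq_bBit (s p : Int) (hs : 0 < s) (k : Nat) :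
    aBit s p k = bBit s p (k : Int) := by
  unfold aBit bBit
  rw [PySem.Int.floordiv_eq_ediv_of_pos hs, PySem.Int.floordiv_eq_ediv_of_pos hs]
  rcases lt_trichotomy p 0 with hp | hp | hp
  · -- p < 0 : both bits are 0
    rw [errAt_of_neg s p hs hp]
    have hk : (k:Int) * p ≤ 0 := mul_nonpos_of_nonneg_of_nonpos (by positivity) (by omega)
    rw [if_neg (by omega)]
    have hmono : ((k:Int) + 1) * p / s ≤ (k:Int) * p / s :=
      Int.ediv_le_ediv hs (by nlinarith)
    rw [if_neg (by omega)]
  · -- p = 0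
    subst hp
    rw [errAt_of_mid s 0 hs le_rfl hs]
    rw [if_neg (by simp only [mul_zero, Int.zero_emod, add_zero]; omega),
        if_neg (by simp)]
  · rcases le_or_gt s p with hps | hps
    · -- s ≤ p : both bits are 1
      rw [errAt_of_ge s p hs hps]
      have hk : (0:Int) ≤ (k:Int) * (p - s) := mul_nonneg (by positivity) (by omega)
      rw [if_pos (by omega)]
      have h1 : ((k:Int) * p + s) / s ≤ ((k:Int) + 1) * p / s :=
        Int.ediv_le_ediv hs (by nlinarith)
      have h2 : ((k:Int) * p + s) / s = (k:Int) * p / s + 1 := by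
        rw [show (k:Int) * p + s = (k:Int) * p + 1 * s by ring, Int.add_mul_ediv_right _ _ (by omega)]
      rw [if_pos (by omega)]
    · -- 0 < p < s
      rw [errAt_of_mid s p hs (by omega) hps]
      set r := ((k:Int) * p) % s with hr
      have hlt : r < s := Int.emod_lt_of_pos _ hs
      have hge : (0:Int) ≤ r := Int.emod_nonneg _ (by omega)
      have hdiv := Int.emod_add_ediv ((k:Int) * p) s
      have hq : ((k:Int) + 1) * p = (r + p) + ((k:Int) * p / s) * s := by nlinarith [hdiv]
      have hsplit : ((k:Int) + 1) * p / s = (r + p) / s + (k:Int) * p / s := by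
        rw [hq, Int.add_mul_ediv_right _ _ (by omega)]
      by_cases hc : s ≤ r + p
      · rw [if_pos hc]
        have : (r + p) / s = 1 := by
          have hrp : (r + p) = (r + p - s) + 1 * s := by ring
          rw [hrp, Int.add_mul_ediv_right _ _ (by omega),
              Int.ediv_eq_zero_of_lt (by omega) (by omega)]
          omega
        rw [if_pos (by omega)]
      · rw [if_neg hc]
        have : (r + p) / s = 0 := Int.ediv_eq_zero_of_lt (by omega) (by omega)
        rw [if_neg (by omega)]

-- Loop invariant: after the first m indices, the list holds aBit at positions < m
-- (0 elsewhere) and the error is errAt m.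
theorem loop_inv (s p : Int) (hs : 0 < s) (m : Nat) (hm : (m : Int) ≤ s) :
    (PySem.List.pyRange 0 (m : Int) 1).foldl
      (fun (st : List Int × Int) i =>
        let error := st.2 + p
        if s ≤ error then (st.1.set i.toNat 1, error - s) else (st.1, error))
      (List.replicate s.toNat 0, 0)
    = ((List.range s.toNat).map (fun j => if j < m then aBit s p j else 0), errAt s p m) := by
  induction m with
  | zero =>
      rw [show (((0:Nat) : Int)) = 0 from rfl, PySem.List.pyRange_one_eq_nil le_rfl]
      simp only [List.foldl_nil, errAt]
      refine Prod.ext ?_ rfl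
      apply List.ext_getElem <;> simp
  | succ m ih =>
      have hm' : (m : Int) ≤ s := by push_cast at hm ⊢; omega
      rw [Nat.cast_add, Nat.cast_one,
          PySem.List.pyRange_one_succ_right (by positivity), List.foldl_append, ih hm']
      simp only [List.foldl_cons, List.foldl_nil]
      have hset : ∀ v : Int,
          ((List.range s.toNat).map (fun j => if j < m then aBit s p j else 0)).set (m:Int).toNat v
          = (List.range s.toNat).map (fun j => if j < m + 1 then (if j = m then v else aBit s p j) else 0) := by
        intro v
        apply List.ext_getElem
        · simp
        · intro j hj1 hj2
          rw [List.getElem_set]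
          simp only [List.getElem_map, List.getElem_range, Int.toNat_natCast]
          by_cases hjm : m = j
          · subst hjm
            rw [if_pos rfl, if_pos (by omega), if_pos rfl]
          · have hne : j ≠ m := fun h => hjm h.symm
            rw [if_neg hjm]
            rcases lt_or_ge j m with h3 | h3
            · rw [if_pos h3, if_pos (by omega), if_neg hne]
            · rw [if_neg (by omega), if_neg (by omega)]
      show (if s ≤ errAt s p m + p then _ else _) = _
      by_cases hc : s ≤ errAt s p m + p
      · rw [if_pos hc]
        refine Prod.ext ?_ ?_
        · show ((List.range s.toNat).map _).set _ 1 = _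
          rw [hset 1]
          congr 1
          funext j
          by_cases hjm : j = m
          · subst hjm
            simp [aBit, if_pos hc]
          · simp [hjm]
        · show errAt s p m + p - s = errAt s p (m + 1)
          simp [errAt, if_pos hc]
      · rw [if_neg hc]
        refine Prod.ext ?_ ?_
        · show (List.range s.toNat).map _ = _
          congr 1
          funext j
          by_cases hjm : j = m
          · subst hjm
            simp [aBit, if_neg hc]
          · by_cases h3 : j < m
            · rw [if_pos h3, if_pos (by omega)]
            · rw [if_neg h3, if_neg (by omega)]
        · show errAt s p m + p = errAt s p (m + 1)
          simp [errAt, if_neg hc]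

-- ===== VERDICT (by name: the statement is the Claim_ definition above) =====
theorem generate_bresenham_sequence_spec : Claim_equal_generate_bresenham_sequence := by
  intro steps pulses _
  show generate_bresenham_sequence steps pulses = generate_bresenham_sequence_alt steps pulses
  rcases le_or_gt steps 0 with hs | hs
  · unfold generate_bresenham_sequence generate_bresenham_sequence_alt
    rw [PySem.List.pyRange_one_eq_nil hs]
    simp [Int.toNat_of_nonpos hs]
  · have hA : generate_bresenham_sequence steps pulses
        = ((PySem.List.pyRange 0 steps 1).foldl
            (fun (st : List Int × Int) i =>
              let error := st.2 + pulses
              if steps ≤ error then (st.1.set i.toNat 1, error - steps) else (st.1, error))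
            (List.replicate steps.toNat 0, 0)).1 := rfl
    have hcast : ((steps.toNat : Nat) : Int) = steps := by omega
    have hinv := loop_inv steps pulses hs steps.toNat (by omega)
    rw [hcast] at hinv
    rw [hA, hinv]
    show (List.range steps.toNat).map (fun j => if j < steps.toNat then aBit steps pulses j else 0)
        = generate_bresenham_sequence_alt steps pulses
    unfold generate_bresenham_sequence_alt
    rw [show PySem.List.pyRange 0 steps 1
          = (List.range steps.toNat).map (fun k => ((k : Nat) : Int)) from by
        rw [PySem.List.pyRange_one, sub_zero]
        simp only [zero_add],
      List.map_map]
    apply List.map_congr_left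
    intro j hj
    simp only [Function.comp_apply]
    rw [if_pos (List.mem_range.mp hj)]
    have h := aBit_eq_bBit steps pulses hs j
    unfold bBit at h
    exact h
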